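-- pv_equiv track=rewrite | github.com/johnhillescobar/census_tool | src/utils/variable_validator.py | _suggest_alternatives
-- ===== SOURCE A (Python) =====
-- from typing import Dict, Iterable, List, Optional, Tuple
--
-- def _table_prefix(variable: str) -> str:
--     if "_" in variable:
--         return variable.split("_", 1)[0]
--     return variable
--
-- def _score_candidate(
--     target_prefix: str,
--     target_concept: str,
--     target_label: str,
--     candidate_name: str,
--     candidate_meta: Dict,
-- ) -> int:
--     score = 0
--     candidate_prefix = _table_prefix(candidate_name)
--     candidate_concept = (candidate_meta.get("concept") or "").strip().lower()
--     candidate_label = (candidate_meta.get("label") or "").strip().lower()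
--
--     if candidate_prefix == target_prefix:
--         score += 3
--     if target_concept and candidate_concept == target_concept:
--         score += 4
--     elif target_concept and target_concept in candidate_concept:
--         score += 2
--     if target_label and target_label in candidate_label:
--         score += 1
--     return score
--
-- def _suggest_alternatives(
--     variable: str,
--     target_meta: Optional[Dict],
--     catalog: Dict[str, Dict],
--     max_results: int = 5,
-- ) -> List[str]:
--     target_prefix = _table_prefix(variable)
--     target_concept = (target_meta or {}).get("concept", "")
--     target_label = (target_meta or {}).get("label", "")
--     target_concept_lower = target_concept.strip().lower()
--     target_label_lower = target_label.strip().lower()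
--
--     scored: List[Tuple[int, str]] = []
--     for candidate_name, candidate_meta in catalog.items():
--         if candidate_name == variable:
--             continue
--         score = _score_candidate(
--             target_prefix,
--             target_concept_lower,
--             target_label_lower,
--             candidate_name,
--             candidate_meta,
--         )
--         if score > 0:
--             scored.append((score, candidate_name))
--
--     scored.sort(key=lambda item: (-item[0], item[1]))
--     if scored:
--         return [name for _, name in scored[:max_results]]
--
--     prefix_stub = target_prefix[:3]
--     fallback = [
--         name
--         for name in sorted(catalog.keys())
--         if name != variable and name.startswith(prefix_stub)
--     ]
--     if fallback:
--         return fallback[:max_results]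
--
--     remaining = [name for name in sorted(catalog.keys()) if name != variable]
--     return remaining[:max_results]
-- ===== SOURCE B (Python) =====
-- def _table_prefix(variable: str) -> str:
--     if "_" in variable:
--         return variable.split("_", 1)[0]
--     return variable
--
--
-- def _score_candidate(target_prefix, target_concept, target_label, candidate_name, candidate_meta) -> int:
--     score = 0
--     candidate_prefix = _table_prefix(candidate_name)
--     candidate_concept = (candidate_meta.get("concept") or "").strip().lower()
--     candidate_label = (candidate_meta.get("label") or "").strip().lower()
--     if candidate_prefix == target_prefix:
--         score += 3
--     if target_concept and candidate_concept == target_concept: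
--         score += 4
--     elif target_concept and target_concept in candidate_concept:
--         score += 2
--     if target_label and target_label in candidate_label:
--         score += 1
--     return score
--
--
-- def _suggest_alternatives(variable, target_meta, catalog, max_results=5):
--     target_prefix = _table_prefix(variable)
--     meta = target_meta or {}
--     target_concept = meta.get("concept", "").strip().lower()
--     target_label = meta.get("label", "").strip().lower()
--
--     # bucket sort: names grouped by their integer score (1..8)
--     buckets = {}
--     for name, cmeta in catalog.items():
--         if name == variable:
--             continue
--         score = _score_candidate(target_prefix, target_concept, target_label, name, cmeta)
--         if score > 0:
--             buckets.setdefault(score, []).append(name)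
--
--     if buckets:
--         ranked = []
--         for score in range(8, 0, -1):
--             if score in buckets:
--                 ranked.extend(sorted(buckets[score]))
--         return ranked[:max_results]
--
--     prefix_stub = target_prefix[:3]
--     names = [n for n in sorted(catalog.keys()) if n != variable]
--     with_stub = [n for n in names if n.startswith(prefix_stub)]
--     return (with_stub or names)[:max_results]
-- ===== Notes on version B (the rewrite author's own statement) =====
-- stated objective: alternative
-- what changed: B replaces A's comparison sort of (-score, name) pairs by a bucket sort (a dict score->names filled in one pass, read out from score 8 down to 1 with each bucket sorted by name) and folds A's two fallback scans into one filtered pass over the sorted keys; Pre_ excludes catalogs whose association list repeats a key, which no Python dict can represent.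
import Mathlib
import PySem

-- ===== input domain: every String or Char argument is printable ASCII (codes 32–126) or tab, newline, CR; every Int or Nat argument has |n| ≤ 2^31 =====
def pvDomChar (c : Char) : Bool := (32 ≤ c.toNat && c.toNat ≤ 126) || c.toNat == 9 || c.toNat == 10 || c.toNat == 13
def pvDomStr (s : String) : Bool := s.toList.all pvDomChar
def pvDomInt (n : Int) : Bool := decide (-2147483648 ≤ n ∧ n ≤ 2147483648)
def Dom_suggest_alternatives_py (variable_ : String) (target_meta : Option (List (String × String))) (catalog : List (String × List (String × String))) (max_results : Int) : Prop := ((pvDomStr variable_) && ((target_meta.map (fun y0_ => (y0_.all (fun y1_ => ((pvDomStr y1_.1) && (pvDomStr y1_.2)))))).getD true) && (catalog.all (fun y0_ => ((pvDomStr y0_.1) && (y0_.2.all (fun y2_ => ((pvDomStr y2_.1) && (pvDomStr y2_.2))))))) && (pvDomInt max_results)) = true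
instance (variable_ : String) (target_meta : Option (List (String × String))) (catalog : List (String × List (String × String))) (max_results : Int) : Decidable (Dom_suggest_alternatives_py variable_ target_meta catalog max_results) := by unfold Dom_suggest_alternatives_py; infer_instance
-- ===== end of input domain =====

-- B replaces A's comparison sort of (−score, name) pairs by a bucket sort keyed on the integer
-- score, and folds A's two fallback scans into one filtered pass (objective: alternative).

-- ===== PORT A =====
-- shared module helper _table_prefix (identical in Source A and Source B)
def pvTablePrefix (variable_ : String) : String :=
  if PySem.Str.isIn "_" variable_ then
    -- variable.split("_", 1)[0]; split with a non-empty separator always returns a non-empty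
    -- list, so the fallback arm is unreachable
    match PySem.Str.splitMax? variable_ "_" 1 with
    | some (h :: _) => h
    | _ => variable_
  else variable_

-- shared module helper _score_candidate (identical in Source A and Source B)
def pvScoreCandidate (target_prefix target_concept target_label : String)
    (candidate_name : String) (candidate_meta : List (String × String)) : Int :=
  let score : Int := 0
  let candidate_prefix := pvTablePrefix candidate_name
  -- candidate_meta.get("concept") or "" : a missing key and a falsy (empty) value both give ""
  let candidate_concept := PySem.Str.lower (PySem.Str.strip (((PySem.Dict.mk candidate_meta).get? "concept").getD ""))
  let candidate_label := PySem.Str.lower (PySem.Str.strip (((PySem.Dict.mk candidate_meta).get? "label").getD ""))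
  let score := if candidate_prefix == target_prefix then score + 3 else score
  let score := if target_concept != "" && candidate_concept == target_concept then score + 4
               else if target_concept != "" && PySem.Str.isIn target_concept candidate_concept then score + 2
               else score
  let score := if target_label != "" && PySem.Str.isIn target_label candidate_label then score + 1 else score
  score

def suggest_alternatives_py (variable_ : String) (target_meta : Option (List (String × String))) (catalog : List (String × List (String × String))) (max_results : Int) : List String :=
  let target_prefix := pvTablePrefix variable_
  -- (target_meta or {}) : None and the (falsy) empty dict both act as {}
  let tmd : PySem.Dict String String := PySem.Dict.mk (target_meta.getD [])
  let target_concept := tmd.getD "concept" ""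
  let target_label := tmd.getD "label" ""
  let target_concept_lower := PySem.Str.lower (PySem.Str.strip target_concept)
  let target_label_lower := PySem.Str.lower (PySem.Str.strip target_label)
  let scored : List (Int × String) := catalog.foldl (fun acc p =>
      if p.1 == variable_ then acc
      else
        let score := pvScoreCandidate target_prefix target_concept_lower target_label_lower p.1 p.2
        if score > 0 then acc ++ [(score, p.1)] else acc) []
  let scored := PySem.List.sorted2 scored (fun item => -item.1) (fun item => item.2)
  if scored ≠ [] then
    (PySem.List.slice scored none (some max_results)).map (fun x => x.2)
  else
    let prefix_stub := PySem.Str.slice target_prefix none (some 3)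
    let fallback := (PySem.List.sorted (catalog.map (fun p => p.1)) (fun x => x)).filter
        (fun name => name != variable_ && PySem.Str.startswith name prefix_stub)
    if fallback ≠ [] then PySem.List.slice fallback none (some max_results)
    else
      let remaining := (PySem.List.sorted (catalog.map (fun p => p.1)) (fun x => x)).filter (fun name => name != variable_)
      PySem.List.slice remaining none (some max_results)

-- ===== PORT B =====
def suggest_alternatives_py_alt (variable_ : String) (target_meta : Option (List (String × String))) (catalog : List (String × List (String × String))) (max_results : Int) : List String :=
  let target_prefix := pvTablePrefix variable_
  let tmd : PySem.Dict String String := PySem.Dict.mk (target_meta.getD [])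
  let target_concept := PySem.Str.lower (PySem.Str.strip (tmd.getD "concept" ""))
  let target_label := PySem.Str.lower (PySem.Str.strip (tmd.getD "label" ""))
  -- bucket sort: buckets.setdefault(score, []).append(name) is d.modify score [] (· ++ [name])
  let buckets : PySem.Dict Int (List String) := catalog.foldl (fun d p =>
      if p.1 == variable_ then d
      else
        let score := pvScoreCandidate target_prefix target_concept target_label p.1 p.2
        if score > 0 then d.modify score [] (fun l => l ++ [p.1]) else d) PySem.Dict.empty
  if buckets.size ≠ 0 then
    let ranked := (PySem.List.pyRange 8 0 (-1)).foldl (fun acc s =>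
        if buckets.contains s then acc ++ PySem.List.sorted (buckets.getD s []) (fun x => x) else acc) []
    PySem.List.slice ranked none (some max_results)
  else
    let prefix_stub := PySem.Str.slice target_prefix none (some 3)
    let names := (PySem.List.sorted (catalog.map (fun p => p.1)) (fun x => x)).filter (fun n => n != variable_)
    let with_stub := names.filter (fun n => PySem.Str.startswith n prefix_stub)
    PySem.List.slice (if with_stub ≠ [] then with_stub else names) none (some max_results)

-- ===== PRECONDITION & SPEC =====
-- Pre_ excludes catalogs whose association list repeats a key: a Python dict cannot hold
-- duplicate keys, so such lists do not represent any input the Python function ever sees.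
def Pre_suggest_alternatives_py (variable_ : String) (target_meta : Option (List (String × String))) (catalog : List (String × List (String × String))) (max_results : Int) : Prop :=
  (catalog.map (fun p => p.1)).Nodup
instance (variable_ : String) (target_meta : Option (List (String × String))) (catalog : List (String × List (String × String))) (max_results : Int) : Decidable (Pre_suggest_alternatives_py variable_ target_meta catalog max_results) := by unfold Pre_suggest_alternatives_py; infer_instance

def pvWitness_suggest_alternatives_py : String × (Option (List (String × String))) × (List (String × List (String × String))) × Int :=
  ("b01_001e", some [("concept", "Total Pop")], [("b01_002e", [("concept", "total pop")]), ("acs_x", [("label", "x")])], 5)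

def Spec_suggest_alternatives_py (variable_ : String) (target_meta : Option (List (String × String))) (catalog : List (String × List (String × String))) (max_results : Int) (out : List String) : Prop := out = suggest_alternatives_py_alt variable_ target_meta catalog max_results
instance (variable_ : String) (target_meta : Option (List (String × String))) (catalog : List (String × List (String × String))) (max_results : Int) (out : List String) : Decidable (Spec_suggest_alternatives_py variable_ target_meta catalog max_results out) := by unfold Spec_suggest_alternatives_py; infer_instance

-- ===== CLAIM (what is proved, stated in full; the proofs are below) =====
def Claim_equal_suggest_alternatives_py : Prop := ∀ (variable_ : String) (target_meta : Option (List (String × String))) (catalog : List (String × List (String × String))) (max_results : Int), Dom_suggest_alternatives_py variable_ target_meta catalog max_results → Pre_suggest_alternatives_py variable_ target_meta catalog max_results → Spec_suggest_alternatives_py variable_ target_meta catalog max_results (suggest_alternatives_py variable_ target_meta catalog max_results)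

-- ===== LEMMAS AND PROOFS =====

theorem pv_witness_ok : Dom_suggest_alternatives_py (pvWitness_suggest_alternatives_py.1) (pvWitness_suggest_alternatives_py.2.1) (pvWitness_suggest_alternatives_py.2.2.1) (pvWitness_suggest_alternatives_py.2.2.2) ∧ Pre_suggest_alternatives_py (pvWitness_suggest_alternatives_py.1) (pvWitness_suggest_alternatives_py.2.1) (pvWitness_suggest_alternatives_py.2.2.1) (pvWitness_suggest_alternatives_py.2.2.2) := by
  decide


-- proof-only abbreviations for the common scoring pass
def pvPred (v tp tc tl : String) (p : String × List (String × String)) : Bool :=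
  !(p.1 == v) && decide (pvScoreCandidate tp tc tl p.1 p.2 > 0)

def pvEntry (tp tc tl : String) (p : String × List (String × String)) : Int × String :=
  (pvScoreCandidate tp tc tl p.1 p.2, p.1)

def pvL (v tp tc tl : String) (catalog : List (String × List (String × String))) : List (Int × String) :=
  (catalog.filter (pvPred v tp tc tl)).map (pvEntry tp tc tl)

theorem pv_foldA (v tp tc tl : String) (catalog : List (String × List (String × String))) :
    catalog.foldl (fun acc p =>
      if p.1 == v then acc
      else if pvScoreCandidate tp tc tl p.1 p.2 > 0 then acc ++ [(pvScoreCandidate tp tc tl p.1 p.2, p.1)] else acc)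
      ([] : List (Int × String)) = pvL v tp tc tl catalog := by
  rw [PySem.List.foldl_congr_mem' _ _
      (fun acc p => if pvPred v tp tc tl p then acc ++ [pvEntry tp tc tl p] else acc) _ ?_]
  · rw [PySem.List.foldl_append_if, List.nil_append]; rfl
  · intro p _ acc
    by_cases h1 : p.1 == v <;> by_cases h2 : pvScoreCandidate tp tc tl p.1 p.2 > 0 <;>
      simp [pvPred, pvEntry, h1, h2]

theorem pv_foldB (v tp tc tl : String) (catalog : List (String × List (String × String))) :
    catalog.foldl (fun d p =>
      if p.1 == v then d
      else if pvScoreCandidate tp tc tl p.1 p.2 > 0 then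
        d.modify (pvScoreCandidate tp tc tl p.1 p.2) [] (fun l => l ++ [p.1]) else d)
      (PySem.Dict.empty : PySem.Dict Int (List String))
    = (pvL v tp tc tl catalog).foldl (fun d q => d.modify q.1 [] (fun l => l ++ [q.2])) PySem.Dict.empty := by
  rw [PySem.List.foldl_congr_mem' _ _
      (fun d p => if pvPred v tp tc tl p then
        d.modify (pvEntry tp tc tl p).1 [] (fun l => l ++ [(pvEntry tp tc tl p).2]) else d) _ ?_]
  · rw [PySem.List.foldl_if_eq_foldl_filter, pvL, List.foldl_map]
  · intro p _ d
    by_cases h1 : p.1 == v <;> by_cases h2 : pvScoreCandidate tp tc tl p.1 p.2 > 0 <;>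
      simp [pvPred, pvEntry, h1, h2]

theorem pv_score_pos_le (tp tc tl n : String) (m : List (String × String)) :
    pvScoreCandidate tp tc tl n m ≤ 8 := by
  simp only [pvScoreCandidate]
  split_ifs <;> norm_num

theorem pv_perm_flatMap_filter (R : List Int) (hR : R.Nodup) :
    ∀ (L : List (Int × String)), (∀ q ∈ L, q.1 ∈ R) →
    (R.flatMap (fun s => L.filter (fun q => q.1 == s))).Perm L := by
  induction R with
  | nil =>
    intro L h
    have hL : L = [] := by
      cases L with
      | nil => rfl
      | cons x t => exact absurd (h x (by simp)) (by simp)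
    simp [hL]
  | cons s R ih =>
    intro L h
    have hsR : s ∉ R := (List.nodup_cons.mp hR).1
    have hR' : R.Nodup := (List.nodup_cons.mp hR).2
    rw [List.flatMap_cons]
    have hcong : (R.flatMap (fun r => L.filter (fun q => q.1 == r)))
        = R.flatMap (fun r => (L.filter (fun q => !(q.1 == s))).filter (fun q => q.1 == r)) := by
      apply List.flatMap_congr
      intro r hr
      rw [List.filter_filter]
      apply List.filter_congr
      intro q _
      by_cases hq : q.1 = r
      · have hrs : ¬ r = s := by rintro rfl; exact hsR hr
        simp [hq, hrs]
      · simp [hq]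
    rw [hcong]
    have hmem : ∀ q ∈ L.filter (fun q => !(q.1 == s)), q.1 ∈ R := by
      intro q hq
      rcases List.mem_filter.mp hq with ⟨hqL, hqs⟩
      have := h q hqL
      simp at hqs
      simpa [hqs] using this
    exact ((ih hR' _ hmem).append_left _).trans (List.filter_append_perm _ L)

theorem pv_cmp_eq :
    (fun a b : Int × String => decide (-a.1 < -b.1) || (!decide (-b.1 < -a.1) && decide (a.2 < b.2)))
    = (fun a b : Int × String => decide (toLex (-a.1, a.2) < toLex (-b.1, b.2))) := by
  funext a b
  rcases lt_trichotomy (-a.1 : Int) (-b.1) with h | h | h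
  · simp [h, Prod.Lex.toLex_lt_toLex, asymm h]
  · simp [h, Prod.Lex.toLex_lt_toLex]
  · have h3 : a.1 ≠ b.1 := by omega
    simp [Prod.Lex.toLex_lt_toLex, asymm h, h]
    exact fun he => absurd he h3

theorem pv_sorted2_eq_sorted_lex (L : List (Int × String)) :
    PySem.List.sorted2 L (fun it => -it.1) (fun it => it.2)
    = PySem.List.sorted L (fun it => toLex (-it.1, it.2)) := by
  rw [PySem.List.sorted_eq_foldl_insertBy]
  show L.foldl (fun acc x => PySem.List.insertBy
      (fun a b : Int × String => decide (-a.1 < -b.1) || (!decide (-b.1 < -a.1) && decide (a.2 < b.2))) x acc) []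
    = L.foldl (fun acc x => PySem.List.insertBy
      (fun a b : Int × String => decide (toLex (-a.1, a.2) < toLex (-b.1, b.2))) x acc) []
  rw [pv_cmp_eq]

theorem pv_sort_buckets (L : List (Int × String)) (hnd : (L.map (fun q => q.2)).Nodup)
    (hs : ∀ q ∈ L, 1 ≤ q.1 ∧ q.1 ≤ 8) :
    (PySem.List.sorted2 L (fun it => -it.1) (fun it => it.2)).map (fun q => q.2)
    = (PySem.List.pyRange 8 0 (-1)).flatMap
        (fun s => PySem.List.sorted ((L.filter (fun q => q.1 == s)).map (fun q => q.2)) (fun x => x)) := by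
  have hR : PySem.List.pyRange 8 0 (-1) = [8, 7, 6, 5, 4, 3, 2, 1] := by decide
  rw [pv_sorted2_eq_sorted_lex, hR]
  have hbnd : ∀ s : Int, ((L.filter (fun q => q.1 == s)).map (fun q => q.2)).Nodup := by
    intro s
    exact ((List.filter_sublist (l := L) (p := fun q => q.1 == s)).map _).nodup hnd
  have hbmem : ∀ s : Int, ∀ q ∈ PySem.List.sorted (L.filter (fun q => q.1 == s)) (fun q => q.2), q.1 = s := by
    intro s q hq
    have hmem := (PySem.List.mem_sorted (L.filter (fun q => q.1 == s)) (fun q => q.2) false q).mp hq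
    simpa using (List.mem_filter.mp hmem).2
  have hwithin : ∀ s : Int, (PySem.List.sorted (L.filter (fun q => q.1 == s)) (fun q => q.2)).Pairwise
      (fun a b => a.2 < b.2) := by
    intro s
    have hle := PySem.List.sorted_pairwise (L.filter (fun q => q.1 == s)) (fun q => q.2)
    have hnod : ((PySem.List.sorted (L.filter (fun q => q.1 == s)) (fun q => q.2)).map (fun q => q.2)).Nodup := by
      have hperm := (PySem.List.sorted_perm (L.filter (fun q => q.1 == s)) (fun q => q.2) false).map (fun q => q.2)
      exact (hperm.nodup_iff).mpr (hbnd s)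
    have hne := List.pairwise_map.mp hnod
    exact (hle.and hne).imp (fun h => lt_of_le_of_ne h.1 h.2)
  have hmain : PySem.List.sorted L (fun it => toLex (-it.1, it.2))
      = ([8, 7, 6, 5, 4, 3, 2, 1] : List Int).flatMap
          (fun s => PySem.List.sorted (L.filter (fun q => q.1 == s)) (fun q => q.2)) := by
    apply PySem.List.sorted_eq_of_perm_of_pairwise_lt
    · have h1 : (([8, 7, 6, 5, 4, 3, 2, 1] : List Int).flatMap
            (fun s => PySem.List.sorted (L.filter (fun q => q.1 == s)) (fun q => q.2))).Perm
          (([8, 7, 6, 5, 4, 3, 2, 1] : List Int).flatMap (fun s => L.filter (fun q => q.1 == s))) :=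
        List.Perm.flatMap (List.Perm.refl _) (fun s _ => PySem.List.sorted_perm _ _ _)
      refine h1.trans (pv_perm_flatMap_filter _ (by decide) L ?_)
      intro q hq
      have := hs q hq
      simp only [List.mem_cons, List.not_mem_nil, or_false]
      omega
    · rw [List.pairwise_flatMap]
      constructor
      · intro s _
        refine List.Pairwise.imp_of_mem ?_ (hwithin s)
        intro a b ha hb hab
        have ha1 := hbmem s a ha
        have hb1 := hbmem s b hb
        rw [Prod.Lex.toLex_lt_toLex]
        exact Or.inr ⟨by rw [ha1, hb1], hab⟩
      · have hgt : ([8, 7, 6, 5, 4, 3, 2, 1] : List Int).Pairwise (fun a b => b < a) := by decide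
        refine hgt.imp ?_
        intro s t hst x hx y hy
        have hx1 := hbmem s x hx
        have hy1 := hbmem t y hy
        rw [Prod.Lex.toLex_lt_toLex]
        exact Or.inl (by omega)
  rw [hmain, List.map_flatMap]
  apply List.flatMap_congr
  intro s _
  symm
  apply PySem.List.sorted_eq_of_perm_of_pairwise_lt
  · exact (PySem.List.sorted_perm _ _ _).map _
  · exact List.pairwise_map.mpr (hwithin s)

theorem pv_emptiness (L : List (Int × String)) :
    PySem.List.sorted2 L (fun it => -it.1) (fun it => it.2) = [] ↔ L = [] := by
  constructor
  · intro h
    have := PySem.List.sorted2_perm L (fun it => -it.1) (fun it => it.2) false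
    rw [h] at this
    exact List.perm_nil.mp this.symm
  · rintro rfl; rfl

theorem pv_size_keys {κ ν : Type} (d : PySem.Dict κ ν) : d.size = d.keys.length := by
  simp [PySem.Dict.size, PySem.Dict.keys]

theorem pv_buckets_keys (L : List (Int × String)) :
    (L.foldl (fun d q => d.modify q.1 [] (fun l => l ++ [q.2])) (PySem.Dict.empty : PySem.Dict Int (List String))).keys
    = PySem.Set.ofList (L.map (fun q => q.1)) := by
  rw [PySem.Dict.keys_foldl_modify_key L (fun q => q.1) [] (fun _ q => fun l => l ++ [q.2]) PySem.Dict.empty,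
      PySem.Dict.keys_empty, PySem.Set.ofList_eq_foldl]
  rfl

theorem pv_ofList_eq_nil_iff {α : Type} [BEq α] [LawfulBEq α] (xs : List α) :
    PySem.Set.ofList xs = [] ↔ xs = [] := by
  cases xs with
  | nil => simp [PySem.Set.ofList_eq_foldl]
  | cons x t =>
    constructor
    · intro h
      have : x ∈ PySem.Set.ofList (x :: t) := (PySem.Set.mem_ofList _ _).mpr (by simp)
      rw [h] at this
      cases this
    · intro h; cases h

theorem pv_slice_map {α β : Type} (l : List α) (f : α → β) (a b : Option Int) :
    (PySem.List.slice l a b).map f = PySem.List.slice (l.map f) a b := by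
  simp [PySem.List.slice, List.map_take, List.map_drop]

theorem pv_names_nodup (v tp tc tl : String) (catalog : List (String × List (String × String)))
    (hnd : (catalog.map (fun p => p.1)).Nodup) :
    ((pvL v tp tc tl catalog).map (fun q => q.2)).Nodup := by
  have h1 : (pvL v tp tc tl catalog).map (fun q => q.2)
      = (catalog.filter (pvPred v tp tc tl)).map (fun p => p.1) := by
    simp [pvL, List.map_map, pvEntry, Function.comp]
  rw [h1]
  exact ((List.filter_sublist (l := catalog) (p := pvPred v tp tc tl)).map _).nodup hnd

theorem pv_scores_bounded (v tp tc tl : String) (catalog : List (String × List (String × String))) :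
    ∀ q ∈ pvL v tp tc tl catalog, 1 ≤ q.1 ∧ q.1 ≤ 8 := by
  intro q hq
  rcases List.mem_map.mp hq with ⟨p, hp, rfl⟩
  have hpred := (List.mem_filter.mp hp).2
  simp only [pvPred, Bool.and_eq_true, decide_eq_true_eq] at hpred
  have hle := pv_score_pos_le tp tc tl p.1 p.2
  simp only [pvEntry]
  omega

theorem pv_filter_nil_of_not_mem (L : List (Int × String)) (s : Int)
    (h : s ∉ L.map (fun q => q.1)) : L.filter (fun q => q.1 == s) = [] := by
  refine List.filter_eq_nil_iff.mpr ?_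
  intro q hq
  simp only [beq_iff_eq]
  rintro rfl
  exact h (List.mem_map.mpr ⟨q, hq, rfl⟩)

theorem pv_ranked (L : List (Int × String)) :
    (PySem.List.pyRange 8 0 (-1)).foldl (fun acc s =>
        if (L.foldl (fun d q => d.modify q.1 [] (fun l => l ++ [q.2])) (PySem.Dict.empty : PySem.Dict Int (List String))).contains s
        then acc ++ PySem.List.sorted
          ((L.foldl (fun d q => d.modify q.1 [] (fun l => l ++ [q.2])) (PySem.Dict.empty : PySem.Dict Int (List String))).getD s [])
          (fun x => x)
        else acc) []
    = (PySem.List.pyRange 8 0 (-1)).flatMap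
        (fun s => PySem.List.sorted ((L.filter (fun q => q.1 == s)).map (fun q => q.2)) (fun x => x)) := by
  have hgetD : ∀ s : Int,
      (L.foldl (fun d q => d.modify q.1 [] (fun l => l ++ [q.2])) (PySem.Dict.empty : PySem.Dict Int (List String))).getD s []
      = (L.filter (fun q => q.1 == s)).map (fun q => q.2) := by
    intro s
    rw [PySem.Dict.getD_foldl_modify_append, PySem.Dict.getD_empty, List.nil_append]
  rw [PySem.List.foldl_congr_mem' _ _
      (fun acc s => acc ++
        (if (L.foldl (fun d q => d.modify q.1 [] (fun l => l ++ [q.2])) (PySem.Dict.empty : PySem.Dict Int (List String))).contains s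
         then PySem.List.sorted
           ((L.foldl (fun d q => d.modify q.1 [] (fun l => l ++ [q.2])) (PySem.Dict.empty : PySem.Dict Int (List String))).getD s [])
           (fun x => x)
         else [])) _ ?_]
  · rw [PySem.List.foldl_append_eq_flatMap, List.nil_append]
    apply List.flatMap_congr
    intro s _
    by_cases hc : (L.foldl (fun d q => d.modify q.1 [] (fun l => l ++ [q.2])) (PySem.Dict.empty : PySem.Dict Int (List String))).contains s = true
    · rw [if_pos hc, hgetD]
    · rw [if_neg hc]
      have hs : s ∉ L.map (fun q => q.1) := by
        intro hmem
        apply hc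
        rw [PySem.Dict.contains_eq_decide_mem_keys, pv_buckets_keys]
        exact decide_eq_true ((PySem.Set.mem_ofList _ _).mpr hmem)
      rw [pv_filter_nil_of_not_mem L s hs]
      rfl
  · intro s _ acc
    by_cases hc : (L.foldl (fun d q => d.modify q.1 [] (fun l => l ++ [q.2])) (PySem.Dict.empty : PySem.Dict Int (List String))).contains s = true <;>
      simp [hc]

theorem pv_size_ne_zero (L : List (Int × String)) (hL : L ≠ []) :
    (L.foldl (fun d q => d.modify q.1 [] (fun l => l ++ [q.2])) (PySem.Dict.empty : PySem.Dict Int (List String))).size ≠ 0 := by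
  rw [pv_size_keys, pv_buckets_keys]
  intro h
  have hnil := List.length_eq_zero_iff.mp h
  have := (pv_ofList_eq_nil_iff (L.map (fun q => q.1))).mp hnil
  exact hL (List.map_eq_nil_iff.mp this)

theorem pv_eq (variable_ : String) (target_meta : Option (List (String × String))) (catalog : List (String × List (String × String))) (max_results : Int)
    (hnd : (catalog.map (fun p => p.1)).Nodup) :
    suggest_alternatives_py variable_ target_meta catalog max_results
    = suggest_alternatives_py_alt variable_ target_meta catalog max_results := by
  simp only [suggest_alternatives_py, suggest_alternatives_py_alt]
  rw [pv_foldA, pv_foldB, pv_ranked]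
  by_cases hL : pvL variable_ (pvTablePrefix variable_)
      (PySem.Str.lower (PySem.Str.strip ((PySem.Dict.mk (target_meta.getD [])).getD "concept" "")))
      (PySem.Str.lower (PySem.Str.strip ((PySem.Dict.mk (target_meta.getD [])).getD "label" ""))) catalog = []
  · rw [hL]
    have hfb : List.filter (fun n => PySem.Str.startswith n (PySem.Str.slice (pvTablePrefix variable_) none (some 3)))
          (List.filter (fun n => n != variable_) (PySem.List.sorted (catalog.map (fun p => p.1)) (fun x => x)))
        = List.filter (fun name => name != variable_ &&
            PySem.Str.startswith name (PySem.Str.slice (pvTablePrefix variable_) none (some 3)))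
          (PySem.List.sorted (catalog.map (fun p => p.1)) (fun x => x)) := by
      rw [List.filter_filter]
      apply List.filter_congr
      intro n _
      exact Bool.and_comm _ _
    simp only [PySem.List.sorted2, List.foldl_nil, ne_eq, not_true_eq_false, if_false,
      PySem.Dict.size, PySem.Dict.empty, List.length_nil, hfb]
    split_ifs <;> rfl
  · have h1 : PySem.List.sorted2
        (pvL variable_ (pvTablePrefix variable_)
          (PySem.Str.lower (PySem.Str.strip ((PySem.Dict.mk (target_meta.getD [])).getD "concept" "")))
          (PySem.Str.lower (PySem.Str.strip ((PySem.Dict.mk (target_meta.getD [])).getD "label" ""))) catalog)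
        (fun item => -item.1) (fun item => item.2) ≠ [] :=
      fun h => hL ((pv_emptiness _).mp h)
    have h2 := pv_size_ne_zero _ hL
    rw [if_pos h1, if_pos h2, pv_slice_map]
    congr 1
    exact pv_sort_buckets _ (pv_names_nodup _ _ _ _ _ hnd) (pv_scores_bounded _ _ _ _ _)

-- ===== VERDICT (by name: the statement is the Claim_ definition above) =====
theorem suggest_alternatives_py_spec : Claim_equal_suggest_alternatives_py := by
  intro variable_ target_meta catalog max_results _ hpre
  exact pv_eq variable_ target_meta catalog max_results hpre
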